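-- pv_equiv track=rewrite | github.com/jjsornwakii/OODS | ch2/รหัสลับ.py | bon
-- ===== SOURCE A (Python) =====
-- def bon(w):
--     check_list = []
--     count = 0
--     last_count = 0
--     myChar = ''
--     for i in range(len(w)-1):
--         if w[i] == w[i+1]:
--             count+=1
--
--         if(count >= last_count):
--             myChar = w[i]
--             last_count = count
--             count = 0
--
--     return (ord(myChar)-96)*4
-- ===== SOURCE B (Python) =====
-- def bon(w):
--     myChar = w[-2]
--     for a, b in reversed(list(zip(w, w[1:]))):
--         if a == b:
--             myChar = a
--             break
--     return (ord(myChar) - 96) * 4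
-- ===== Notes on version B (the rewrite author's own statement) =====
-- stated objective: simpler
-- what changed: B replaces A's forward scan with count/last_count bookkeeping by a backward scan over the adjacent-pair list that stops at the first (i.e. last-in-string) equal pair, defaulting to w[-2]; Pre_ excludes strings of length < 2, on which A raises TypeError and B raises IndexError.
import Mathlib
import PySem

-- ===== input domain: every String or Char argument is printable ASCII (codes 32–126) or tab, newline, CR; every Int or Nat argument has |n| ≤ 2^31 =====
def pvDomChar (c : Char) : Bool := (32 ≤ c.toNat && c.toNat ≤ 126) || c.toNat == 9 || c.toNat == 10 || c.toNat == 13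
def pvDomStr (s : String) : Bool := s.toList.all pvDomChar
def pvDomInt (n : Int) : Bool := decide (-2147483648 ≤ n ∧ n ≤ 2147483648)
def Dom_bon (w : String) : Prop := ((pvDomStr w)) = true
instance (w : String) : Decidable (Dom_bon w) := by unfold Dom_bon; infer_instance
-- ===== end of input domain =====

-- B drops A's count/last_count bookkeeping: it scans the adjacent-pair list backwards and
-- stops at the first equal pair (defaulting to w[-2]) — simpler, same O(n) cost.

-- ===== PORT A =====
def stepA (cs : List Char) (s : Int × Int × Option Char) (i : Int) : Int × Int × Option Char :=
  let count := if PySem.List.pyGetD cs i ' ' == PySem.List.pyGetD cs (i + 1) ' ' then s.1 + 1 else s.1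
  if count ≥ s.2.1 then (0, count, some (PySem.List.pyGetD cs i ' '))
  else (count, s.2.1, s.2.2)

def bon (w : String) : Int :=
  let cs := w.toList
  let s := (PySem.List.pyRange 0 ((cs.length : Int) - 1) 1).foldl (stepA cs) (0, 0, none)
  match s.2.2 with
  | some c => ((c.toNat : Int) - 96) * 4
  | none => 0  -- Python raises TypeError here; excluded by Pre_bon

-- ===== PORT B =====
def scanB : List (Char × Char) → Option Char
  | [] => none
  | (a, b) :: rest => if a == b then some a else scanB rest

def bon_alt (w : String) : Int :=
  let cs := w.toList
  match PySem.List.pyGet? cs (-2) with  -- myChar = w[-2]; none = IndexError, excluded by Pre_bon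
  | some d =>
    let myChar := (scanB ((cs.zip cs.tail).reverse)).getD d
    ((myChar.toNat : Int) - 96) * 4
  | none => 0

-- ===== PRECONDITION & SPEC =====
-- Pre_ excludes strings of length < 2, on which A raises TypeError (ord('')) and B raises IndexError (w[-2]).
def Pre_bon (w : String) : Prop := 2 ≤ w.toList.length
instance (w : String) : Decidable (Pre_bon w) := by unfold Pre_bon; infer_instance

def pvWitness_bon : String := "aabba"

def Spec_bon (w : String) (out : Int) : Prop := out = bon_alt w
instance (w : String) (out : Int) : Decidable (Spec_bon w out) := by unfold Spec_bon; infer_instance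

-- ===== CLAIM (what is proved, stated in full; the proofs are below) =====
def Claim_equal_bon : Prop := ∀ (w : String), Dom_bon w → Pre_bon w → Spec_bon w (bon w)

-- ===== LEMMAS AND PROOFS =====
-- the loop body of A, expressed on the pair (w[i], w[i+1]) instead of the index i
def step2 (s : Int × Int × Option Char) (p : Char × Char) : Int × Int × Option Char :=
  let count := if p.1 == p.2 then s.1 + 1 else s.1
  if count ≥ s.2.1 then (0, count, some p.1)
  else (count, s.2.1, s.2.2)

def fP (p : Char × Char) : Bool := p.1 == p.2

theorem scanB_eq_find (l : List (Char × Char)) :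
    scanB l = (l.find? fP).map (·.1) := by
  induction l with
  | nil => simp [scanB]
  | cons p rest ih =>
    obtain ⟨a, b⟩ := p
    by_cases h : a == b <;> simp [scanB, List.find?, fP, h, ih]

theorem foldlA (ps : List (Char × Char)) (hne : ps ≠ []) :
    ps.foldl step2 ((0 : Int), (0 : Int), (none : Option Char)) =
      (0, (if (ps.reverse.find? fP).isSome then (1 : Int) else 0),
        some (((ps.reverse.find? fP).getD (ps.getLastD (' ', ' '))).1)) := by
  induction ps using List.reverseRecOn with
  | nil => exact absurd rfl hne
  | append_singleton qs p ih =>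
    rcases List.eq_nil_or_concat qs with hq | _
    · subst hq
      obtain ⟨a, b⟩ := p
      by_cases h : a == b <;>
        simp [step2, fP, h, List.find?]
    · have hqne : qs ≠ [] := by
        rintro rfl; simp_all
      rw [List.foldl_append, ih hqne]
      obtain ⟨a, b⟩ := p
      rw [List.reverse_append]
      by_cases h : a == b
      · rcases hfq : qs.reverse.find? fP with _ | p <;>
          simp [step2, fP, h]
      · rcases hfq : qs.reverse.find? fP with _ | p <;>
          simp [step2, fP, h, hfq]

theorem foldl_idx_eq_pairs (cs : List Char) (h : 2 ≤ cs.length) :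
    (PySem.List.pyRange 0 ((cs.length : Int) - 1) 1).foldl (stepA cs)
        ((0 : Int), (0 : Int), (none : Option Char)) =
      (cs.zip cs.tail).foldl step2 ((0 : Int), (0 : Int), (none : Option Char)) := by
  have hzlen : ((cs.zip cs.tail).length : Int) = (cs.length : Int) - 1 := by
    simp [List.length_zip, List.length_tail]
    omega
  rw [show ((cs.length : Int) - 1) = ((cs.zip cs.tail).length : Int) from hzlen.symm]
  rw [PySem.List.foldl_congr_mem _ (stepA cs)
      (fun acc j => step2 acc (PySem.List.pyGetD (cs.zip cs.tail) j (' ', ' '))) _ ?_]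
  · exact PySem.List.foldl_pyRange_zero_pyGetD' _ _ _ _
  · intro acc j hj
    rw [PySem.List.mem_pyRange_one] at hj
    have h0 : 0 ≤ j := hj.1
    have hlt : j < ((cs.zip cs.tail).length : Int) := hj.2
    have hjz : j.toNat < (cs.zip cs.tail).length := by omega
    have hjc : j.toNat < cs.length := by
      simp [List.length_zip, List.length_tail] at hjz; omega
    have hjc1 : j.toNat + 1 < cs.length := by
      simp [List.length_zip, List.length_tail] at hjz; omega
    have e1 : PySem.List.pyGetD cs j ' ' = cs[j.toNat] :=
      PySem.List.pyGetD_eq_getElem cs ' ' h0 (by omega)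
    have e2 : PySem.List.pyGetD cs (j + 1) ' ' = cs[j.toNat + 1] := by
      rw [PySem.List.pyGetD_eq_getElem cs ' ' (by omega) (by omega)]
      simp only [show (j + 1).toNat = j.toNat + 1 from by omega]
    have e3 : PySem.List.pyGetD (cs.zip cs.tail) j (' ', ' ') = (cs[j.toNat], cs[j.toNat + 1]) := by
      rw [PySem.List.pyGetD_eq_getElem _ _ h0 (by omega), List.getElem_zip, List.getElem_tail]
    simp only [stepA, step2, e1, e2, e3]

theorem bon_spec : Claim_equal_bon := by
  intro w _ hpre
  simp only [Spec_bon, bon, bon_alt]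
  have hn : 2 ≤ w.toList.length := hpre
  have hlw : w.length = w.toList.length := by simp
  have hps : w.toList.zip w.toList.tail ≠ [] := by
    have : 0 < (w.toList.zip w.toList.tail).length := by
      simp [List.length_zip, List.length_tail]; omega
    exact List.ne_nil_of_length_pos this
  have hget : PySem.List.pyGet? w.toList (-2) = some w.toList[w.toList.length - 2] := by
    rw [PySem.List.pyGet?_neg_ofNat w.toList 2 (by omega) hn,
      List.getElem?_eq_getElem (by omega)]
  rw [foldl_idx_eq_pairs _ hn, foldlA _ hps, scanB_eq_find, hget]
  rcases hf : (w.toList.zip w.toList.tail).reverse.find? fP with _ | p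
  · have hlast : ((w.toList.zip w.toList.tail).getLastD (' ', ' ')).1
        = w.toList[w.toList.length - 2] := by
      have hzl : (w.toList.zip w.toList.tail).length = w.length - 1 := by
        simp [List.length_zip, List.length_tail]
      have hidx : (w.toList.zip w.toList.tail).length - 1
          < (w.toList.zip w.toList.tail).length := by omega
      rw [List.getLastD_eq_getLast?, List.getLast?_eq_getElem?,
        List.getElem?_eq_getElem hidx, Option.getD_some, List.getElem_zip, List.getElem_tail]
      exact getElem_congr rfl (by omega) (by omega)
    simp
    rw [← List.getLastD_eq_getLast?, hlast]
    simp only [← hlw]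
  · simp
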